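-- pv_equiv track=rewrite | github.com/ggranpiri/KLS_projects | 4th Task/BIP.py | shag
-- ===== SOURCE A (Python) =====
-- def shag(x, time, way):
--     way += [x]
--     if sorted(way) == [0, 1, 2, 3, 4, 5, 6, 7]:
--         return time
--     for i in range(len(history[x])):
--         if history[x][i] and i not in way:
--             if i in [3, 4, 7]:
--                 return max(4, shag(i, time + history[x][i], way))
--
--             else:
--                 return shag(i, time + history[x][i], way)
--
--     return time
--
-- history = [[0, 2, 0, 0, 4, 0, 0, 3],
--            [2, 0, 2, 0, 0, 0, 0, 0],
--            [0, 2, 0, 4, 0, 0, 0, 0],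
--            [0, 0, 4, 0, 4, 2, 0, 0],
--            [4, 0, 0, 4, 0, 0, 2, 0],
--            [0, 0, 0, 2, 0, 0, 2, 2],
--            [0, 0, 0, 0, 2, 2, 0, 0],
--            [3, 0, 0, 0, 0, 2, 0, 0]]
-- ===== SOURCE B (Python) =====
-- history = [[0, 2, 0, 0, 4, 0, 0, 3],
--            [2, 0, 2, 0, 0, 0, 0, 0],
--            [0, 2, 0, 4, 0, 0, 0, 0],
--            [0, 0, 4, 0, 4, 2, 0, 0],
--            [4, 0, 0, 4, 0, 0, 2, 0],
--            [0, 0, 0, 2, 0, 0, 2, 2],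
--            [0, 0, 0, 0, 2, 2, 0, 0],
--            [3, 0, 0, 0, 0, 2, 0, 0]]
--
--
-- def shag(x, time, way):
--     # Two staged passes: (1) extend `way` in place along the greedy walk,
--     # recording only the nodes; (2) sum the traversed edge weights from the
--     # recorded segment, applying one final max(4, .) iff some visited node
--     # (after the start) lies in {3, 4, 7}.
--     start = len(way)
--     way.append(x)
--     while sorted(way) != [0, 1, 2, 3, 4, 5, 6, 7]:
--         row = history[way[-1]]
--         nxt = next((i for i, v in enumerate(row) if v and i not in way), None)
--         if nxt is None:
--             break
--         way.append(nxt)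
--     seg = way[start:]
--     total = time + sum(history[a][b] for a, b in zip(seg, seg[1:]))
--     bumped = any(n in (3, 4, 7) for n in seg[1:])
--     return max(4, total) if bumped else total
-- ===== Notes on version B (the rewrite author's own statement) =====
-- stated objective: simpler
-- what changed: Replaces A's recursion, which wraps each step into node 3/4/7 in its own nested max(4, ...) call, by two staged passes: a loop that only records the walked nodes into way, then a zip-sum of the traversed edge weights and a single final max(4, total) applied iff any recorded node after the start lies in {3, 4, 7}.
import Mathlib
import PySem

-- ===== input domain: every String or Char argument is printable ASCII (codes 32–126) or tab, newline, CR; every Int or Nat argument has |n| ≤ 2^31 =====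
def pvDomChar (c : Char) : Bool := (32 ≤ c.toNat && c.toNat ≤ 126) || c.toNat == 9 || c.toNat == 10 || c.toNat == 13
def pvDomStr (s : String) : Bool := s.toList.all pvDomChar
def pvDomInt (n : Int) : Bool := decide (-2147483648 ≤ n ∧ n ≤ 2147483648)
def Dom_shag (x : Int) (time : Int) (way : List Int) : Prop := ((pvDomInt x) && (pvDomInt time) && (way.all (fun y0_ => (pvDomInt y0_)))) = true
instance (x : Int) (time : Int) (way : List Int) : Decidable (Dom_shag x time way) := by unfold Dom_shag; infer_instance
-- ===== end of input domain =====

-- B replaces A's recursion (a fresh max(4,·) wrapper per step into node 3/4/7) by two staged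
-- passes: first record the walked nodes, then sum the edge weights and apply one final max(4,·):
-- objective 'simpler'. Python A and B mutate `way` in place identically; the theorems below are
-- about the return value.

-- ===== PORT A =====
-- the module-level constant `history`
def historyL : List (List Int) :=
  [[0, 2, 0, 0, 4, 0, 0, 3],
   [2, 0, 2, 0, 0, 0, 0, 0],
   [0, 2, 0, 4, 0, 0, 0, 0],
   [0, 0, 4, 0, 4, 2, 0, 0],
   [4, 0, 0, 4, 0, 0, 2, 0],
   [0, 0, 0, 2, 0, 0, 2, 2],
   [0, 0, 0, 0, 2, 2, 0, 0],
   [3, 0, 0, 0, 0, 2, 0, 0]]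

-- the body of A's `for i in range(len(history[x]))` loop: first index i (counting from `k`) with
-- history[x][i] truthy and i not in way, together with history[x][i]; none = loop falls through
def findStep : List Int → List Int → Nat → Option (Nat × Int)
  | [], _, _ => none
  | v :: rest, w, k =>
      if v ≠ 0 ∧ ¬ ((k : Int) ∈ w) then some (k, v) else findStep rest w (k + 1)

-- literal port of A's recursion; `fuel` only makes it total (A excludes an index ≥ len from the
-- walk by `i not in way`, so at most 8 recursive calls happen and fuel 20 is never exhausted;
-- on exhaustion return `time`, the same fall-through value)
def shagFuel : Nat → Int → Int → List Int → Int
  | 0, _, time, _ => time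
  | Nat.succ fuel, x, time, way =>
      let w := way ++ [x]                                  -- way += [x]
      if PySem.List.sorted w (fun v => v) false = [0, 1, 2, 3, 4, 5, 6, 7] then time
      else
        let row := (PySem.List.pyGet? historyL x).getD []  -- history[x]; [] models the raising case, excluded by Pre_
        match findStep row w 0 with
        | none => time
        | some (i, v) =>
            if (i : Int) = 3 ∨ (i : Int) = 4 ∨ (i : Int) = 7 then
              max 4 (shagFuel fuel (i : Int) (time + v) w)
            else shagFuel fuel (i : Int) (time + v) w

def shag (x : Int) (time : Int) (way : List Int) : Int := shagFuel 20 x time way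

-- ===== PORT B =====
-- history[y] (posssibly negative y); [] models the raising case, excluded by Pre_
def rowOf (y : Int) : List Int := (PySem.List.pyGet? historyL y).getD []

-- next((i for i, v in enumerate(row) if v and i not in way), None)
def nextNode (w : List Int) (y : Int) : Option Int :=
  ((PySem.List.enumerate (rowOf y) 0).find? (fun p => p.2 != 0 && !(w.contains p.1))).map
    (fun p => p.1)

-- phase 1, Source B's while-loop: extend the walk list node by node (same fuel guard as A's port;
-- on exhaustion it stops extending, the walk never needs more than 8 steps)
def extendWalk : Nat → List Int → List Int
  | 0, w => w
  | Nat.succ fuel, w =>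
      if PySem.List.sorted w (fun v => v) false = [0, 1, 2, 3, 4, 5, 6, 7] then w
      else
        match nextNode w ((PySem.List.pyGet? w (-1)).getD 0) with  -- way[-1]; w is nonempty here
        | none => w
        | some i => extendWalk fuel (w ++ [i])

-- phase 2: sum(history[a][b] for a, b in zip(seg, seg[1:]))
def edgeSum (seg : List Int) : Int :=
  (seg.zip (seg.drop 1)).foldl (fun acc p => acc + (PySem.List.pyGet? (rowOf p.1) p.2).getD 0) 0

def shag_alt (x : Int) (time : Int) (way : List Int) : Int :=
  let w := extendWalk 20 (way ++ [x])
  let seg := w.drop way.length                             -- way[start:]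
  let total := time + edgeSum seg
  let bumped := (seg.drop 1).any (fun n => n == 3 || n == 4 || n == 7)
  if bumped then max 4 total else total

-- ===== PRECONDITION & SPEC =====
-- Pre_ excludes exactly the inputs where Python A raises IndexError: a start node x outside
-- Python's index range -8..7 for history, unless the sorted(way+[x]) check returns first.
def Pre_shag (x : Int) (_time : Int) (way : List Int) : Prop :=
  (-8 ≤ x ∧ x ≤ 7) ∨ PySem.List.sorted (way ++ [x]) (fun v => v) false = [0, 1, 2, 3, 4, 5, 6, 7]
instance (x : Int) (time : Int) (way : List Int) : Decidable (Pre_shag x time way) := by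
  unfold Pre_shag; infer_instance
def pvWitness_shag : Int × Int × List Int := (0, 0, [])
def Spec_shag (x : Int) (time : Int) (way : List Int) (out : Int) : Prop := out = shag_alt x time way
instance (x : Int) (time : Int) (way : List Int) (out : Int) : Decidable (Spec_shag x time way out) := by unfold Spec_shag; infer_instance

-- ===== CLAIM (what is proved, stated in full; the proofs are below) =====
def Claim_equal_shag : Prop := ∀ (x : Int) (time : Int) (way : List Int), Dom_shag x time way → Pre_shag x time way → Spec_shag x time way (shag x time way)

-- ===== LEMMAS AND PROOFS =====

-- was the walk bumped, and the wrapped total: the value B computes from a recorded segment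
def wrapB (time : Int) (seg : List Int) : Int :=
  if (seg.drop 1).any (fun n => n == 3 || n == 4 || n == 7) then max 4 (time + edgeSum seg)
  else time + edgeSum seg

-- extendWalk only appends to its argument
theorem extendWalk_append (fuel : Nat) :
    ∀ w : List Int, ∃ t : List Int, extendWalk fuel w = w ++ t := by
  induction fuel with
  | zero => intro w; exact ⟨[], by simp [extendWalk]⟩
  | succ fuel ih =>
      intro w
      simp only [extendWalk]
      split
      · exact ⟨[], by simp⟩
      · cases h : nextNode w ((PySem.List.pyGet? w (-1)).getD 0) with
        | none => exact ⟨[], by simp⟩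
        | some i =>
            obtain ⟨t, ht⟩ := ih (w ++ [i])
            exact ⟨[i] ++ t, by simp [ht]⟩

-- B's generator scan agrees with A's indexed loop
theorem find_eq_findStep (w : List Int) :
    ∀ (row : List Int) (k : Nat),
      ((PySem.List.enumerate row (k : Int)).find? (fun p => p.2 != 0 && !(w.contains p.1))).map
          (fun p => p.1)
        = (findStep row w k).map (fun p => ((p.1 : Nat) : Int)) := by
  intro row
  induction row with
  | nil => intro k; simp [findStep, PySem.List.enumerate_nil]
  | cons v rest ih =>
      intro k
      rw [PySem.List.enumerate_cons]
      by_cases hc : v ≠ 0 ∧ ¬ ((k : Int) ∈ w)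
      · simp [findStep, hc]
      · have hF : (v != 0 && !(w.contains ((k : Int)))) = false := by
          by_contra h
          exact hc (by simpa using (Bool.of_not_eq_false h))
        have h1 : ((k : Int) + 1) = ((k + 1 : Nat) : Int) := by push_cast; ring
        rw [show findStep (v :: rest) w k = findStep rest w (k + 1) from by
          rw [findStep, if_neg hc]]
        rw [← ih (k + 1), ← h1]
        have hF' : (v != 0 && !decide (((k : Int)) ∈ w)) = false := by simpa using hF
        simp [hF']

-- the value A reads in its step is the entry B re-reads in phase 2
theorem findStep_val (w : List Int) :
    ∀ (row : List Int) (k i : Nat) (v : Int),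
      findStep row w k = some (i, v) → k ≤ i ∧ row[i - k]? = some v := by
  intro row
  induction row with
  | nil => intro k i v h; simp [findStep] at h
  | cons a rest ih =>
      intro k i v h
      rw [findStep] at h
      split at h
      · simp only [Option.some.injEq, Prod.mk.injEq] at h
        obtain ⟨hk, hv⟩ := h
        refine ⟨by omega, ?_⟩
        have h0 : i - k = 0 := by omega
        rw [h0]
        simpa using hv
      · obtain ⟨hle, hg⟩ := ih (k + 1) i v h
        refine ⟨by omega, ?_⟩
        have : i - k = (i - (k + 1)) + 1 := by omega
        rw [this]
        simpa using hg

-- edgeSum peels one edge off the front of a two-or-more-node segment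
theorem edgeSum_cons (a b : Int) (t : List Int) :
    edgeSum (a :: b :: t) = (PySem.List.pyGet? (rowOf a) b).getD 0 + edgeSum (b :: t) := by
  simp only [edgeSum, List.drop_succ_cons, List.drop_zero, List.zip_cons_cons, List.foldl_cons]
  rw [PySem.List.foldl_add, PySem.List.foldl_add]
  ring

-- A's recursion computes B's two-phase value, for every fuel and start state
theorem fuel_eq_walk (fuel : Nat) :
    ∀ (x time : Int) (way : List Int),
      shagFuel fuel x time way =
        wrapB time ((extendWalk fuel (way ++ [x])).drop way.length) := by
  induction fuel with
  | zero =>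
      intro x time way
      simp [shagFuel, extendWalk, wrapB, edgeSum]
  | succ fuel ih =>
      intro x time way
      simp only [shagFuel, extendWalk]
      have hlast : (PySem.List.pyGet? (way ++ [x]) (-1)).getD 0 = x := by
        rw [PySem.List.pyGet?_neg_one_append_singleton]; rfl
      split
      · simp [wrapB, edgeSum]
      · rw [hlast]
        have hnn : nextNode (way ++ [x]) x
            = (findStep (rowOf x) (way ++ [x]) 0).map (fun p => ((p.1 : Nat) : Int)) := by
          unfold nextNode
          have := find_eq_findStep (way ++ [x]) (rowOf x) 0
          simpa using this
        cases hF : findStep (rowOf x) (way ++ [x]) 0 with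
        | none =>
            rw [show (PySem.List.pyGet? historyL x).getD [] = rowOf x from rfl, hF, hnn, hF]
            simp [wrapB, edgeSum]
        | some p =>
            obtain ⟨i, v⟩ := p
            rw [show (PySem.List.pyGet? historyL x).getD [] = rowOf x from rfl, hF, hnn, hF]
            simp only [Option.map_some]
            obtain ⟨t, ht⟩ := extendWalk_append fuel ((way ++ [x]) ++ [(i : Int)])
            have hseg : (extendWalk fuel ((way ++ [x]) ++ [(i : Int)])).drop way.length
                = x :: (i : Int) :: t := by
              rw [ht]
              simp [List.append_assoc]
            have hseg' : (extendWalk fuel ((way ++ [x]) ++ [(i : Int)])).drop (way ++ [x]).length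
                = (i : Int) :: t := by
              rw [ht]
              simp [List.append_assoc]
            have hIH := ih (i : Int) (time + v) (way ++ [x])
            rw [hseg'] at hIH
            have hval : (PySem.List.pyGet? (rowOf x) ((i : Nat) : Int)).getD 0 = v := by
              have hg := (findStep_val (way ++ [x]) (rowOf x) 0 i v hF).2
              simp only [Nat.sub_zero] at hg
              rw [PySem.List.pyGet?_natCast, hg]
              rfl
            rw [hIH, hseg]
            unfold wrapB
            rw [edgeSum_cons, hval]
            by_cases hb : (i : Int) = 3 ∨ (i : Int) = 4 ∨ (i : Int) = 7
            · have hbB : (((i : Int)) == 3 || ((i : Int)) == 4 || ((i : Int)) == 7) = true := by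
                rcases hb with h | h | h <;> simp [h]
              simp only [if_pos hb, List.drop_succ_cons, List.drop_zero, List.any_cons, hbB,
                Bool.true_or, if_pos]
              split <;> omega
            · have hbB : (((i : Int)) == 3 || ((i : Int)) == 4 || ((i : Int)) == 7) = false := by
                simp only [Bool.or_eq_false_iff, beq_eq_false_iff_ne]
                exact ⟨⟨fun h => hb (Or.inl h), fun h => hb (Or.inr (Or.inl h))⟩,
                  fun h => hb (Or.inr (Or.inr h))⟩
              simp only [if_neg hb, List.drop_succ_cons, List.drop_zero, List.any_cons, hbB,
                Bool.false_or]
              ring_nf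

-- ===== VERDICT (by name: the statement is the Claim_ definition above) =====
theorem shag_spec : Claim_equal_shag := by
  intro x time way _ _
  unfold Spec_shag shag shag_alt
  rw [fuel_eq_walk]
  simp [wrapB]
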